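-- pv_equiv track=rewrite | github.com/heruohan/Algorithm-Problem | 434-Number of Segment in a string.py | countSegment
-- ===== SOURCE A (Python) =====
-- def countSegment(s):
--     res=0
--     lens=len(s)
--     i=0
--     while(i<lens):
--         if(s[i]==' '):
--             i+=1
--             continue
--         res+=1
--         while(i<lens and s[i]!=' '):
--             i+=1
--     return(res)
-- ===== SOURCE B (Python) =====
-- def countSegment(s):
--     res = 0
--     prev_space = True
--     for c in s:
--         if c != ' ' and prev_space:
--             res += 1
--         prev_space = (c == ' ')
--     return res
-- ===== Notes on version B (the rewrite author's own statement) =====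
-- stated objective: simpler
-- what changed: Replaced the outer-plus-inner word-consuming index loop with a single flat pass over the characters that counts word-start boundaries via a previous-char-was-space flag.
import Mathlib
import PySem

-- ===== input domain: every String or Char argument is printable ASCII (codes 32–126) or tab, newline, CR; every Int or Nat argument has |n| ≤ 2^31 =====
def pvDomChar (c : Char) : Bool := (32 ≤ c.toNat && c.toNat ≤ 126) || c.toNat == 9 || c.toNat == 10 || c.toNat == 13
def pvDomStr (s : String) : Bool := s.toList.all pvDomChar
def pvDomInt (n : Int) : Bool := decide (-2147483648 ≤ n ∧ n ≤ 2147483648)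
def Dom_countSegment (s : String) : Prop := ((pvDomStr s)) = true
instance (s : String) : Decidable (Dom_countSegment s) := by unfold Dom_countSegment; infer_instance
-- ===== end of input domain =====

-- B replaces A's outer loop with inner word-consuming scan by one flat pass counting
-- word-start boundaries (objective: simpler).


-- ===== PORT A =====
-- A's outer while: skip a space and continue, or count 1 and let the inner while
-- advance i past the current maximal run of non-space characters (= dropWhile).
def countSegmentA_loop : List Char → Int
  | [] => 0
  | c :: t =>
    if c = ' ' then countSegmentA_loop t
    else 1 + countSegmentA_loop (t.dropWhile (fun d => d ≠ ' '))
termination_by l => l.length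
decreasing_by
  all_goals simp only [List.length_cons]
  · omega
  · have h := List.length_dropWhile_le (fun d => decide (d ≠ ' ')) t
    omega

def countSegment (s : String) : Int := countSegmentA_loop s.toList

-- ===== PORT B =====
-- Source B's flat loop: state (res, prev_space), one step per character.
def countSegmentB_step (st : Int × Bool) (c : Char) : Int × Bool :=
  ((if c ≠ ' ' ∧ st.2 then st.1 + 1 else st.1), c = ' ')

def countSegment_alt (s : String) : Int :=
  (s.toList.foldl countSegmentB_step (0, true)).1

-- ===== PRECONDITION & SPEC =====
def Spec_countSegment (s : String) (out : Int) : Prop := out = countSegment_alt s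
instance (s : String) (out : Int) : Decidable (Spec_countSegment s out) := by unfold Spec_countSegment; infer_instance

-- ===== CLAIM (what is proved, stated in full; the proofs are below) =====
def Claim_equal_countSegment : Prop := ∀ (s : String), Dom_countSegment s → Spec_countSegment s (countSegment s)

-- ===== LEMMAS AND PROOFS =====

-- reference count with an explicit prev-space flag, structural in the list
def segAux : Bool → List Char → Int
  | _, [] => 0
  | prev, c :: t =>
    if c = ' ' then segAux true t
    else (if prev then 1 else 0) + segAux false t

theorem foldl_step_eq (l : List Char) : ∀ (res : Int) (prev : Bool),
    (l.foldl countSegmentB_step (res, prev)).1 = res + segAux prev l := by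
  induction l with
  | nil => intro res prev; simp [segAux]
  | cons c t ih =>
    intro res prev
    by_cases hc : c = ' '
    · simp [countSegmentB_step, hc, segAux, ih]
    · cases prev <;> simp [countSegmentB_step, hc, segAux, ih] <;> try ring

theorem segAux_eq (l : List Char) :
    segAux true l = countSegmentA_loop l ∧
    segAux false l = countSegmentA_loop (l.dropWhile (fun d => d ≠ ' ')) := by
  induction l with
  | nil => simp [segAux, countSegmentA_loop]
  | cons c t ih =>
    by_cases hc : c = ' '
    · simp [segAux, hc, countSegmentA_loop, List.dropWhile, ih.1]
    · constructor
      · simp [segAux, hc, countSegmentA_loop, ih.2]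
      · simp [segAux, hc, List.dropWhile, ih.2]

-- ===== VERDICT (by name: the statement is the Claim_ definition above) =====
theorem countSegment_spec : Claim_equal_countSegment := by
  intro s _
  unfold Spec_countSegment countSegment countSegment_alt
  rw [foldl_step_eq, (segAux_eq s.toList).1, zero_add]
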